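-- pv_equiv track=rewrite | github.com/alinaprolygina/BDinMED | HW2/task2_8.py | extract_patient_info
-- ===== SOURCE A (Python) =====
-- def extract_patient_info(hl7_message):
--     segments = hl7_message.split('\n')
--     birth_year, gender = None, None
--
--     for segment in segments:
--         # Looking for the PID segment
--         if segment.startswith('PID'):
--             fields = segment.split('|')
--             if len(fields) > 8:
--                 birth_date = fields[7]
--                 gender = fields[8]
--
--                 # Check if birth date is present and gender is male ('M')
--                 if birth_date and gender == 'M':
--                     try:
--                         birth_year = int(birth_date[:4])
--                     except ValueError:
--                         continue
--
--     return birth_year, gender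
-- ===== SOURCE B (Python) =====
-- def extract_patient_info(hl7_message):
--     # Reverse scan with two independent last-wins searches: gender and birth_year
--     # may come from different PID segments; stop as soon as both are resolved.
--     birth_year, gender = None, None
--     for segment in reversed(hl7_message.split('\n')):
--         if birth_year is not None and gender is not None:
--             break
--         if not segment.startswith('PID'):
--             continue
--         fields = segment.split('|')
--         if len(fields) <= 8:
--             continue
--         if gender is None:
--             gender = fields[8]
--         if birth_year is None and fields[7] and fields[8] == 'M':
--             try:
--                 birth_year = int(fields[7][:4])
--             except ValueError:
--                 pass
--     return birth_year, gender
-- ===== Notes on version B (the rewrite author's own statement) =====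
-- stated objective: alternative
-- what changed: Replaces the forward last-wins fold over all segments by a reverse scan with two independent first-match searches (gender and birth year resolved separately) that stops as soon as both are found.
import Mathlib
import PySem

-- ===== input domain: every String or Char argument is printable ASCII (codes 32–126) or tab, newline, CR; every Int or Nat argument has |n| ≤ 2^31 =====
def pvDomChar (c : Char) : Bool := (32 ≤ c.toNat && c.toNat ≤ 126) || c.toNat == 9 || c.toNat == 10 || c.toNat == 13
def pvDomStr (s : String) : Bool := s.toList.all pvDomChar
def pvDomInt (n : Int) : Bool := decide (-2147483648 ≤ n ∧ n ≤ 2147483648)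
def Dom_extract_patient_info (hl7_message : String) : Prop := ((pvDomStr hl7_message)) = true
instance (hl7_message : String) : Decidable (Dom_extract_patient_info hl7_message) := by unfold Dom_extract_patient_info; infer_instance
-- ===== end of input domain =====

-- B replaces A's forward last-wins fold by a reverse scan resolving gender and
-- birth year independently with early exit (same values; objective: alternative).

-- ===== PORT A =====
def epiStepA (st : Option Int × Option String) (seg : String) : Option Int × Option String :=
  if PySem.Str.startswith seg "PID" then
    let fields := (PySem.Str.split? seg "|").getD []
    if fields.length > 8 then
      let birth_date := fields.getD 7 ""
      let gender := fields.getD 8 ""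
      if birth_date ≠ "" ∧ gender = "M" then
        match PySem.Int.ofStr? (PySem.Str.slice birth_date none (some 4)) with
        | some n => (some n, some gender)
        | none => (st.1, some gender)    -- ValueError: continue (gender already set)
      else (st.1, some gender)
    else st
  else st

def extract_patient_info (hl7_message : String) : Option Int × Option String :=
  ((PySem.Str.split? hl7_message "\n").getD []).foldl epiStepA (none, none)

-- ===== PORT B =====
def epiGo : List String → Option Int × Option String → Option Int × Option String
  | [], st => st
  | seg :: rest, (b0, g0) =>
    if b0.isSome ∧ g0.isSome then (b0, g0)    -- break: both resolved
    else if PySem.Str.startswith seg "PID" then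
      let fields := (PySem.Str.split? seg "|").getD []
      if fields.length > 8 then
        let g1 := if g0.isNone then some (fields.getD 8 "") else g0
        let b1 := if b0 = none ∧ fields.getD 7 "" ≠ "" ∧ fields.getD 8 "" = "M" then
            PySem.Int.ofStr? (PySem.Str.slice (fields.getD 7 "") none (some 4))
          else b0
        epiGo rest (b1, g1)
      else epiGo rest (b0, g0)
    else epiGo rest (b0, g0)

def extract_patient_info_alt (hl7_message : String) : Option Int × Option String :=
  epiGo ((PySem.Str.split? hl7_message "\n").getD []).reverse (none, none)

-- ===== PRECONDITION & SPEC =====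
def Spec_extract_patient_info (hl7_message : String) (out : Option Int × Option String) : Prop := out = extract_patient_info_alt hl7_message
instance (hl7_message : String) (out : Option Int × Option String) : Decidable (Spec_extract_patient_info hl7_message out) := by unfold Spec_extract_patient_info; infer_instance

-- ===== CLAIM (what is proved, stated in full; the proofs are below) =====
def Claim_equal_extract_patient_info : Prop := ∀ (hl7_message : String), Dom_extract_patient_info hl7_message → Spec_extract_patient_info hl7_message (extract_patient_info hl7_message)

-- ===== LEMMAS AND PROOFS =====

/-- The birth-year contribution of a single segment. -/
def epiY (seg : String) : Option Int :=
  if PySem.Str.startswith seg "PID" then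
    let fields := (PySem.Str.split? seg "|").getD []
    if fields.length > 8 then
      if fields.getD 7 "" ≠ "" ∧ fields.getD 8 "" = "M" then
        PySem.Int.ofStr? (PySem.Str.slice (fields.getD 7 "") none (some 4))
      else none
    else none
  else none

/-- The gender contribution of a single segment. -/
def epiG (seg : String) : Option String :=
  if PySem.Str.startswith seg "PID" then
    let fields := (PySem.Str.split? seg "|").getD []
    if fields.length > 8 then some (fields.getD 8 "") else none
  else none

theorem epiStepA_eq (st : Option Int × Option String) (seg : String) :
    epiStepA st seg = ((epiY seg).or st.1, (epiG seg).or st.2) := by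
  unfold epiStepA epiY epiG
  cases hp : PySem.Int.ofStr? (PySem.Str.slice (((PySem.Str.split? seg "|").getD []).getD 7 "") none (some 4)) <;>
    split_ifs <;> simp_all <;> split_ifs <;> simp_all

theorem findSome?_single {α β : Type} (f : α → Option β) (x : α) :
    List.findSome? f [x] = f x := by
  cases h : f x <;> simp [h]

theorem foldA_eq (l : List String) (st : Option Int × Option String) :
    l.foldl epiStepA st =
      ((l.reverse.findSome? epiY).or st.1, (l.reverse.findSome? epiG).or st.2) := by
  induction l generalizing st with
  | nil => simp
  | cons x xs ih =>
      simp only [List.foldl_cons, ih, epiStepA_eq, List.reverse_cons, List.findSome?_append,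
        findSome?_single, Option.or_assoc]

theorem epiGo_eq (l : List String) (b0 : Option Int) (g0 : Option String) :
    epiGo l (b0, g0) = (b0.or (l.findSome? epiY), g0.or (l.findSome? epiG)) := by
  induction l generalizing b0 g0 with
  | nil => simp [epiGo]
  | cons x xs ih =>
      rw [epiGo]
      by_cases hbg : b0.isSome ∧ g0.isSome
      · rw [if_pos hbg]
        obtain ⟨b, hb⟩ := Option.isSome_iff_exists.mp hbg.1
        obtain ⟨g, hg⟩ := Option.isSome_iff_exists.mp hbg.2
        subst hb hg; simp
      · rw [if_neg hbg]
        have key : ∀ (st : Option Int × Option String),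
            st = (b0.or (epiY x), g0.or (epiG x)) →
            epiGo xs st = (b0.or ((x :: xs).findSome? epiY), g0.or ((x :: xs).findSome? epiG)) := by
          intro st hst
          subst hst
          rw [ih]
          have hcy : (x :: xs).findSome? epiY = (epiY x).or (xs.findSome? epiY) := by
            cases h : epiY x <;> simp [h]
          have hcg : (x :: xs).findSome? epiG = (epiG x).or (xs.findSome? epiG) := by
            cases h : epiG x <;> simp [h]
          rw [hcy, hcg, Option.or_assoc, Option.or_assoc]
        by_cases h1 : PySem.Str.startswith x "PID" = true
        · rw [if_pos h1]
          by_cases h2 : ((PySem.Str.split? x "|").getD []).length > 8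
          · simp only [if_pos h2]
            apply key
            have hyx : epiY x = if ((PySem.Str.split? x "|").getD []).getD 7 "" ≠ "" ∧
                ((PySem.Str.split? x "|").getD []).getD 8 "" = "M" then
                  PySem.Int.ofStr? (PySem.Str.slice (((PySem.Str.split? x "|").getD []).getD 7 "") none (some 4))
                else none := by
              unfold epiY; rw [if_pos h1]; simp only [if_pos h2]
            have hgx : epiG x = some (((PySem.Str.split? x "|").getD []).getD 8 "") := by
              unfold epiG; rw [if_pos h1]; simp only [if_pos h2]
            refine Prod.ext ?_ ?_
            · show (if _ then _ else _) = _
              cases b0 with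
              | some b => simp
              | none =>
                  by_cases hc : ((PySem.Str.split? x "|").getD []).getD 7 "" ≠ "" ∧
                      ((PySem.Str.split? x "|").getD []).getD 8 "" = "M" <;>
                    simp [hyx]
            · show (if _ then _ else _) = _
              cases g0 <;> simp [hgx]
          · simp only [if_neg h2]
            have hyx : epiY x = none := by unfold epiY; rw [if_pos h1]; simp [h2]
            have hgx : epiG x = none := by unfold epiG; rw [if_pos h1]; simp [h2]
            have := key (b0, g0) (by simp [hyx, hgx])
            simpa using this
        · rw [if_neg h1]
          have hyx : epiY x = none := by unfold epiY; rw [if_neg h1]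
          have hgx : epiG x = none := by unfold epiG; rw [if_neg h1]
          have := key (b0, g0) (by simp [hyx, hgx])
          simpa using this

-- ===== VERDICT (by name: the statement is the Claim_ definition above) =====
theorem extract_patient_info_spec : Claim_equal_extract_patient_info := by
  intro m _
  show _ = _
  rw [extract_patient_info, extract_patient_info_alt, foldA_eq, epiGo_eq]
  simp
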